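-- pv_equiv track=rewrite | github.com/LilySu/GLM-5-Decoupled-From-HuggingFace | data/sample_data.py | make_multi_turn_conversation
-- ===== SOURCE A (Python) =====
-- EOS_ID = 1           # <|endoftext|> / end of sequence
--
-- IM_START_ID = 10     # <|im_start|>
--
-- IM_END_ID = 11       # <|im_end|>
--
-- NEWLINE_ID = 12      # \n
--
-- SYSTEM_ID = 20       # "system"
--
-- USER_ID = 21         # "user"
--
-- ASSISTANT_ID = 22    # "assistant"
--
-- CONTENT_TOKENS = list(range(100, 200))
--
-- IGNORE_INDEX = -100  # PyTorch cross_entropy ignore value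
--
-- def _make_content(length):
--     """Generate a sequence of fake content tokens of given length."""
--     return [CONTENT_TOKENS[i % len(CONTENT_TOKENS)] for i in range(length)]
--
-- def make_chat_turn(role_id, content_length):
--     """Build one ChatML turn: <|im_start|> role \\n content \\n <|im_end|> \\n
--
--     Returns (token_ids, is_assistant) where is_assistant marks which tokens
--     are part of the assistant response (for label masking).
--     """
--     content = _make_content(content_length)
--     tokens = [IM_START_ID, role_id, NEWLINE_ID] + content + [NEWLINE_ID, IM_END_ID, NEWLINE_ID]
--     is_assistant = [role_id == ASSISTANT_ID] * len(tokens)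
--     return tokens, is_assistant
--
-- def make_multi_turn_conversation(num_turns=3, system_len=3, user_len=8, assistant_len=6):
--     """Build a multi-turn ChatML conversation.
--
--     Multiple user/assistant exchanges after a single system prompt.
--     Only assistant turns are trained on (labels != -100).
--
--     Returns:
--         input_ids: list[int]
--         labels:    list[int]
--     """
--     all_tokens = []
--     all_masks = []
--
--     # System prompt (once)
--     sys_tokens, sys_mask = make_chat_turn(SYSTEM_ID, system_len)
--     all_tokens.extend(sys_tokens)
--     all_masks.extend(sys_mask)
--
--     # Multiple user/assistant turns
--     for turn in range(num_turns):
--         # Vary content length per turn to stress variable-length handling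
--         u_len = user_len + turn * 2
--         a_len = assistant_len + turn * 3
--         usr_tokens, usr_mask = make_chat_turn(USER_ID, u_len)
--         ast_tokens, ast_mask = make_chat_turn(ASSISTANT_ID, a_len)
--         all_tokens.extend(usr_tokens)
--         all_masks.extend(usr_mask)
--         all_tokens.extend(ast_tokens)
--         all_masks.extend(ast_mask)
--
--     all_tokens.append(EOS_ID)
--     all_masks.append(False)
--
--     labels = []
--     for tok, is_ast in zip(all_tokens, all_masks):
--         if is_ast:
--             labels.append(tok)
--         elif tok == EOS_ID and all_tokens[-1] == EOS_ID:
--             labels.append(tok)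
--         else:
--             labels.append(IGNORE_INDEX)
--
--     return all_tokens, labels
-- ===== SOURCE B (Python) =====
-- EOS_ID = 1
-- IM_START_ID = 10
-- IM_END_ID = 11
-- NEWLINE_ID = 12
-- SYSTEM_ID = 20
-- USER_ID = 21
-- ASSISTANT_ID = 22
-- IGNORE_INDEX = -100
--
--
-- def _labeled_turn(role_id, content_length):
--     """One ChatML turn together with its training labels, in a single pass."""
--     content = [100 + i % 100 for i in range(content_length)]
--     tokens = [IM_START_ID, role_id, NEWLINE_ID] + content + [NEWLINE_ID, IM_END_ID, NEWLINE_ID]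
--     if role_id == ASSISTANT_ID:
--         return tokens, list(tokens)
--     return tokens, [IGNORE_INDEX] * len(tokens)
--
--
-- def make_multi_turn_conversation(num_turns=3, system_len=3, user_len=8, assistant_len=6):
--     tokens, labels = _labeled_turn(SYSTEM_ID, system_len)
--     for turn in range(num_turns):
--         ut, ul = _labeled_turn(USER_ID, user_len + turn * 2)
--         at, al = _labeled_turn(ASSISTANT_ID, assistant_len + turn * 3)
--         tokens += ut + at
--         labels += ul + al
--     return tokens + [EOS_ID], labels + [EOS_ID]
-- ===== Notes on version B (the rewrite author's own statement) =====
-- stated objective: simpler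
-- what changed: B builds input_ids and labels together in one pass (per-turn helper returns tokens plus labels: tokens themselves for assistant turns, IGNORE_INDEX elsewhere, EOS labelled EOS), eliminating A's parallel is_assistant mask and the second label-derivation loop with its tok==EOS_ID check.
import Mathlib
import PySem

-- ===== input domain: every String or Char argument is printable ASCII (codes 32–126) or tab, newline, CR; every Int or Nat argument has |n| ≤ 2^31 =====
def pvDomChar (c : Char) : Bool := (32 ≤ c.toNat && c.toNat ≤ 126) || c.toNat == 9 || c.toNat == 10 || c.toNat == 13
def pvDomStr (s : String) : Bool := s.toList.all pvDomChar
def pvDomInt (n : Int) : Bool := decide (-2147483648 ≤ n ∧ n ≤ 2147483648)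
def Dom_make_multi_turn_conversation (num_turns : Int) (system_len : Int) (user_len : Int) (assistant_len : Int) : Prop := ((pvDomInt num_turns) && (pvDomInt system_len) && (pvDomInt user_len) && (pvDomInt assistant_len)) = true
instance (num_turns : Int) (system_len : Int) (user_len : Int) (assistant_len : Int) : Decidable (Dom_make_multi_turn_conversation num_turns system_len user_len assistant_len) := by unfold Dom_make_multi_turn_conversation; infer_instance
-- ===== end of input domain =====

-- B builds tokens and labels together per turn (assistant turn labels = tokens, other roles all IGNORE_INDEX,
-- final EOS labelled EOS), replacing A's parallel is_assistant mask and second label-derivation loop; objective: simpler.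


-- ===== PORT A =====
def pvCONTENT_TOKENS : List Int := PySem.List.pyRange 100 200 1

-- _make_content; the index i % len(CONTENT_TOKENS) is always in range, so pyGetD's default is never used
def pvMakeContent (length : Int) : List Int :=
  (PySem.List.pyRange 0 length 1).map
    (fun i => PySem.List.pyGetD pvCONTENT_TOKENS (PySem.Int.mod i (pvCONTENT_TOKENS.length : Int)) 0)

-- make_chat_turn
def pvMakeChatTurn (role_id : Int) (content_length : Int) : List Int × List Bool :=
  let content := pvMakeContent content_length
  let tokens : List Int := [10, role_id, 12] ++ content ++ [12, 11, 12]
  (tokens, List.replicate tokens.length (role_id == 22))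

-- the body of A's `for turn in range(num_turns)` loop
def pvStepA (user_len assistant_len : Int) (acc : List Int × List Bool) (turn : Int) : List Int × List Bool :=
  let u := pvMakeChatTurn 21 (user_len + turn * 2)
  let a := pvMakeChatTurn 22 (assistant_len + turn * 3)
  ((acc.1 ++ u.1) ++ a.1, (acc.2 ++ u.2) ++ a.2)

def make_multi_turn_conversation (num_turns : Int) (system_len : Int) (user_len : Int) (assistant_len : Int) : List Int × List Int :=
  let s := pvMakeChatTurn 20 system_len
  let acc := (PySem.List.pyRange 0 num_turns 1).foldl (pvStepA user_len assistant_len) s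
  let all_tokens := acc.1 ++ [1]
  let all_masks := acc.2 ++ [false]
  let labels := (all_tokens.zip all_masks).foldl
    (fun labels p =>
      labels ++ [if p.2 then p.1
                 else if p.1 == 1 && PySem.List.pyGetD all_tokens (-1) 0 == 1 then p.1
                 else (-100 : Int)]) []
  (all_tokens, labels)

-- ===== PORT B =====
-- _labeled_turn
def pvLabeledTurn (role_id : Int) (content_length : Int) : List Int × List Int :=
  let content := (PySem.List.pyRange 0 content_length 1).map (fun i => 100 + PySem.Int.mod i 100)
  let tokens : List Int := [10, role_id, 12] ++ content ++ [12, 11, 12]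
  if role_id == 22 then (tokens, tokens)
  else (tokens, List.replicate tokens.length (-100))

-- the body of B's `for turn in range(num_turns)` loop
def pvStepB (user_len assistant_len : Int) (acc : List Int × List Int) (turn : Int) : List Int × List Int :=
  let u := pvLabeledTurn 21 (user_len + turn * 2)
  let a := pvLabeledTurn 22 (assistant_len + turn * 3)
  (acc.1 ++ (u.1 ++ a.1), acc.2 ++ (u.2 ++ a.2))

def make_multi_turn_conversation_alt (num_turns : Int) (system_len : Int) (user_len : Int) (assistant_len : Int) : List Int × List Int :=
  let s := pvLabeledTurn 20 system_len
  let acc := (PySem.List.pyRange 0 num_turns 1).foldl (pvStepB user_len assistant_len) s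
  (acc.1 ++ [1], acc.2 ++ [1])

-- ===== PRECONDITION & SPEC =====
def Spec_make_multi_turn_conversation (num_turns : Int) (system_len : Int) (user_len : Int) (assistant_len : Int) (out : List Int × List Int) : Prop := out = make_multi_turn_conversation_alt num_turns system_len user_len assistant_len
instance (num_turns : Int) (system_len : Int) (user_len : Int) (assistant_len : Int) (out : List Int × List Int) : Decidable (Spec_make_multi_turn_conversation num_turns system_len user_len assistant_len out) := by unfold Spec_make_multi_turn_conversation; infer_instance

-- ===== CLAIM (what is proved, stated in full; the proofs are below) =====
def Claim_equal_make_multi_turn_conversation : Prop := ∀ (num_turns : Int) (system_len : Int) (user_len : Int) (assistant_len : Int), Dom_make_multi_turn_conversation num_turns system_len user_len assistant_len → Spec_make_multi_turn_conversation num_turns system_len user_len assistant_len (make_multi_turn_conversation num_turns system_len user_len assistant_len)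

-- ===== LEMMAS AND PROOFS =====

-- what A's second loop computes once all_tokens[-1] = EOS_ID is substituted in
def pvG (T : List Int) (M : List Bool) : List Int :=
  (T.zip M).map (fun p => if p.2 then p.1 else if p.1 == 1 then p.1 else (-100 : Int))

theorem pvG_append (T U : List Int) (M N : List Bool) (h : T.length = M.length) :
    pvG (T ++ U) (M ++ N) = pvG T M ++ pvG U N := by
  simp [pvG, List.zip_append h]

theorem pvG_replicate_true (xs : List Int) : pvG xs (List.replicate xs.length true) = xs := by
  induction xs with
  | nil => rfl
  | cons x xs ih => simpa [pvG, List.replicate_succ] using ih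

theorem pvG_replicate_false (xs : List Int) (h : ∀ x ∈ xs, x ≠ 1) :
    pvG xs (List.replicate xs.length false) = List.replicate xs.length (-100) := by
  induction xs with
  | nil => rfl
  | cons x xs ih =>
      have hx : x ≠ 1 := h x (by simp)
      simp only [pvG, List.replicate_succ, List.length_cons, List.zip_cons_cons, List.map_cons]
      rw [if_neg (by simp), if_neg (by simp [hx])]
      simpa [pvG] using ih (fun y hy => h y (by simp [hy]))

theorem content_eq (n : Int) :
    pvMakeContent n = (PySem.List.pyRange 0 n 1).map (fun i => 100 + PySem.Int.mod i 100) := by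
  apply List.map_congr_left
  intro i _
  have hlen : (pvCONTENT_TOKENS.length : Int) = 100 := by decide
  rw [hlen]
  have hm0 : (0 : Int) ≤ PySem.Int.mod i 100 := PySem.Int.mod_nonneg i (by norm_num)
  have hm1 : PySem.Int.mod i 100 < 100 := PySem.Int.mod_lt i (by norm_num)
  rw [PySem.List.pyGetD_eq_getElem pvCONTENT_TOKENS 0 hm0 (by rw [show ((pvCONTENT_TOKENS.length : Int)) = 100 from hlen]; exact hm1)]
  simp only [pvCONTENT_TOKENS]
  rw [PySem.List.getElem_pyRange_one 100 200 _ (by simp [PySem.List.length_pyRange_one]; omega)]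
  omega

theorem turn_tokens_eq (role n : Int) : (pvMakeChatTurn role n).1 = (pvLabeledTurn role n).1 := by
  by_cases h : role = 22 <;> simp [pvMakeChatTurn, pvLabeledTurn, content_eq, h]

theorem turn_len (role n : Int) : (pvMakeChatTurn role n).1.length = (pvMakeChatTurn role n).2.length := by
  simp [pvMakeChatTurn]

theorem turn_no_eos (role n : Int) (hr : role = 20 ∨ role = 21) :
    ∀ x ∈ (pvMakeChatTurn role n).1, x ≠ 1 := by
  intro x hx
  rw [show (pvMakeChatTurn role n).1
      = [10, role, 12] ++ pvMakeContent n ++ [12, 11, 12] from rfl, content_eq] at hx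
  intro heq
  subst heq
  rcases hr with rfl | rfl <;>
  · norm_num [List.mem_append, List.mem_map] at hx
    obtain ⟨i, -, heq⟩ := hx
    have := PySem.Int.mod_nonneg i (b := 100) (by norm_num)
    omega

theorem turn_labels_eq (role n : Int) (hr : role = 20 ∨ role = 21 ∨ role = 22) :
    pvG (pvMakeChatTurn role n).1 (pvMakeChatTurn role n).2 = (pvLabeledTurn role n).2 := by
  rcases hr with rfl | rfl | rfl
  · rw [show (pvMakeChatTurn 20 n).2 = List.replicate (pvMakeChatTurn 20 n).1.length false from by
        simp [pvMakeChatTurn],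
      pvG_replicate_false _ (turn_no_eos 20 n (Or.inl rfl))]
    rw [show (pvLabeledTurn 20 n).2 = List.replicate (pvLabeledTurn 20 n).1.length (-100) from by
        simp [pvLabeledTurn], ← turn_tokens_eq]
  · rw [show (pvMakeChatTurn 21 n).2 = List.replicate (pvMakeChatTurn 21 n).1.length false from by
        simp [pvMakeChatTurn],
      pvG_replicate_false _ (turn_no_eos 21 n (Or.inr rfl))]
    rw [show (pvLabeledTurn 21 n).2 = List.replicate (pvLabeledTurn 21 n).1.length (-100) from by
        simp [pvLabeledTurn], ← turn_tokens_eq]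
  · rw [show (pvMakeChatTurn 22 n).2 = List.replicate (pvMakeChatTurn 22 n).1.length true from by
        simp [pvMakeChatTurn],
      pvG_replicate_true]
    rw [show (pvLabeledTurn 22 n).2 = (pvLabeledTurn 22 n).1 from by simp [pvLabeledTurn],
      ← turn_tokens_eq]

-- invariant relating the two folds over the turn indices
theorem fold_inv (ul al : Int) (l : List Int) (T : List Int) (M : List Bool)
    (h : T.length = M.length) :
    l.foldl (pvStepB ul al) (T, pvG T M)
      = ((l.foldl (pvStepA ul al) (T, M)).1,
         pvG (l.foldl (pvStepA ul al) (T, M)).1 (l.foldl (pvStepA ul al) (T, M)).2) := by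
  induction l generalizing T M with
  | nil => rfl
  | cons t l ih =>
      simp only [List.foldl_cons]
      have hu := turn_labels_eq 21 (ul + t * 2) (Or.inr (Or.inl rfl))
      have ha := turn_labels_eq 22 (al + t * 3) (Or.inr (Or.inr rfl))
      have hlen : ((T ++ (pvMakeChatTurn 21 (ul + t * 2)).1) ++ (pvMakeChatTurn 22 (al + t * 3)).1).length
          = ((M ++ (pvMakeChatTurn 21 (ul + t * 2)).2) ++ (pvMakeChatTurn 22 (al + t * 3)).2).length := by
        simp [h, turn_len 21 (ul + t * 2), turn_len 22 (al + t * 3)]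
      have hrec := ih ((T ++ (pvMakeChatTurn 21 (ul + t * 2)).1) ++ (pvMakeChatTurn 22 (al + t * 3)).1)
        ((M ++ (pvMakeChatTurn 21 (ul + t * 2)).2) ++ (pvMakeChatTurn 22 (al + t * 3)).2) hlen
      rw [show pvStepA ul al (T, M) t
          = ((T ++ (pvMakeChatTurn 21 (ul + t * 2)).1) ++ (pvMakeChatTurn 22 (al + t * 3)).1,
             (M ++ (pvMakeChatTurn 21 (ul + t * 2)).2) ++ (pvMakeChatTurn 22 (al + t * 3)).2) from rfl,
        ← hrec]
      congr 1
      rw [show pvStepB ul al (T, pvG T M) t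
          = (T ++ ((pvLabeledTurn 21 (ul + t * 2)).1 ++ (pvLabeledTurn 22 (al + t * 3)).1),
             pvG T M ++ ((pvLabeledTurn 21 (ul + t * 2)).2 ++ (pvLabeledTurn 22 (al + t * 3)).2)) from rfl]
      refine Prod.ext ?_ ?_
      · rw [← turn_tokens_eq 21 (ul + t * 2), ← turn_tokens_eq 22 (al + t * 3)]
        simp
      · rw [pvG_append _ _ _ _ (by simp [h, turn_len 21 (ul + t * 2)]),
            pvG_append _ _ _ _ h, hu, ha]
        simp

-- lengths of A's fold state stay equal
theorem fold_len (ul al : Int) (l : List Int) (T : List Int) (M : List Bool)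
    (h : T.length = M.length) :
    (l.foldl (pvStepA ul al) (T, M)).1.length = (l.foldl (pvStepA ul al) (T, M)).2.length := by
  induction l generalizing T M with
  | nil => simpa using h
  | cons t l ih =>
      simp only [List.foldl_cons]
      exact ih _ _ (by simp [h, turn_len 21 (ul + t * 2), turn_len 22 (al + t * 3)])

-- ===== VERDICT (by name: the statement is the Claim_ definition above) =====
theorem make_multi_turn_conversation_spec : Claim_equal_make_multi_turn_conversation := by
  intro num_turns system_len user_len assistant_len _
  show make_multi_turn_conversation num_turns system_len user_len assistant_len
      = make_multi_turn_conversation_alt num_turns system_len user_len assistant_len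
  have hS := pvMakeChatTurn 20 system_len
  unfold make_multi_turn_conversation make_multi_turn_conversation_alt
  simp only []
  have hstart : pvLabeledTurn 20 system_len
      = ((pvMakeChatTurn 20 system_len).1, pvG (pvMakeChatTurn 20 system_len).1 (pvMakeChatTurn 20 system_len).2) := by
    refine Prod.ext (turn_tokens_eq 20 system_len).symm ?_
    exact (turn_labels_eq 20 system_len (Or.inl rfl)).symm
  rw [show pvMakeChatTurn 20 system_len
      = ((pvMakeChatTurn 20 system_len).1, (pvMakeChatTurn 20 system_len).2) from rfl,
    hstart,
    fold_inv user_len assistant_len (PySem.List.pyRange 0 num_turns 1) _ _ (turn_len 20 system_len)]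
  generalize hT : (List.foldl (pvStepA user_len assistant_len) _ _).1 = T at *
  generalize hM : (List.foldl (pvStepA user_len assistant_len) _ _).2 = M
  have hGlen : T.length = M.length := by
    rw [← hT, ← hM]; exact fold_len _ _ _ _ _ (turn_len 20 system_len)
  refine Prod.ext rfl ?_
  show ((T ++ [1]).zip (M ++ [false])).foldl
      (fun (labels : List Int) (p : Int × Bool) =>
        labels ++ [if p.2 then p.1
                   else if p.1 == 1 && PySem.List.pyGetD (T ++ [1]) (-1) 0 == 1 then p.1
                   else (-100 : Int)]) []
      = pvG T M ++ [1]
  rw [PySem.List.foldl_append_singleton_eq_map, List.nil_append,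
    PySem.List.pyGetD_neg_one_append_singleton]
  have hfun : (fun (p : Int × Bool) => if p.2 then p.1
        else if p.1 == 1 && (1 : Int) == 1 then p.1 else (-100 : Int))
      = (fun p => if p.2 then p.1 else if p.1 == 1 then p.1 else (-100 : Int)) := by
    funext p; simp
  rw [hfun]
  show pvG (T ++ [1]) (M ++ [false]) = pvG T M ++ [1]
  rw [pvG_append _ _ _ _ hGlen]
  rfl
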